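-- pv_equiv track=rewrite | github.com/irfanqazi-web/AIAlgoTradeHits.com | analyze_table_schemas.py | categorize_tables
-- ===== SOURCE A (Python) =====
-- def categorize_tables(schemas):
--     """Categorize tables by asset type"""
--     categories = {
--         'stocks': [],
--         'crypto': [],
--         'forex': [],
--         'etfs': [],
--         'indices': [],
--         'commodities': [],
--         'other': []
--     }
--
--     for table_name, schema in schemas.items():
--         table_lower = table_name.lower()
--         if 'stock' in table_lower:
--             categories['stocks'].append(table_name)
--         elif 'crypto' in table_lower:
--             categories['crypto'].append(table_name)
--         elif 'forex' in table_lower: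
--             categories['forex'].append(table_name)
--         elif 'etf' in table_lower:
--             categories['etfs'].append(table_name)
--         elif 'indic' in table_lower:
--             categories['indices'].append(table_name)
--         elif 'commodit' in table_lower:
--             categories['commodities'].append(table_name)
--         else:
--             categories['other'].append(table_name)
--
--     return categories
-- ===== SOURCE B (Python) =====
-- RULES = [('stock', 'stocks'), ('crypto', 'crypto'), ('forex', 'forex'),
--          ('etf', 'etfs'), ('indic', 'indices'), ('commodit', 'commodities')]
--
-- CATS = ['stocks', 'crypto', 'forex', 'etfs', 'indices', 'commodities', 'other']
--
--
-- def _cat(name):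
--     low = name.lower()
--     return next((c for sub, c in RULES if sub in low), 'other')
--
--
-- def categorize_tables(schemas):
--     """Categorize tables by asset type"""
--     return {c: [n for n in schemas if _cat(n) == c] for c in CATS}
-- ===== Notes on version B (the rewrite author's own statement) =====
-- stated objective: idiomatic
-- what changed: Replaces the if/elif chain appending into a mutable dict by an ordered rules table with a first-match classifier and a per-category dict comprehension that filters the names.
import Mathlib
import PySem

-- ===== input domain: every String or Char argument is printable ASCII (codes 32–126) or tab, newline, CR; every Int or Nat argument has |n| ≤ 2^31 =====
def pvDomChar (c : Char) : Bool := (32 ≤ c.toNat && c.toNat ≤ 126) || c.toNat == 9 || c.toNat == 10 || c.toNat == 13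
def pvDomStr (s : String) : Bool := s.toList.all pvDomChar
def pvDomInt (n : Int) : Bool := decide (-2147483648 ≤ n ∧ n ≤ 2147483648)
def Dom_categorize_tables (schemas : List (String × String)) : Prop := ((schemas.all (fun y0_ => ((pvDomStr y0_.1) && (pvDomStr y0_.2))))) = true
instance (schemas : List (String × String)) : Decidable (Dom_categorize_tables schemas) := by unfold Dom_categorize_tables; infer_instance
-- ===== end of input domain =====

-- B replaces A's if/elif chain over a mutable dict by an ordered rules table with a
-- first-match classifier and a per-category comprehension (idiomatic; same cost).


-- ===== PORT A =====
def categorize_tables (schemas : List (String × String)) : List (String × List String) :=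
  let init : PySem.Dict String (List String) :=
    PySem.Dict.ofList [("stocks", []), ("crypto", []), ("forex", []), ("etfs", []),
                       ("indices", []), ("commodities", []), ("other", [])]
  let categories := schemas.foldl (fun cats p =>
    let table_lower := PySem.Str.lower p.1
    if PySem.Str.isIn "stock" table_lower then cats.modify "stocks" [] (· ++ [p.1])
    else if PySem.Str.isIn "crypto" table_lower then cats.modify "crypto" [] (· ++ [p.1])
    else if PySem.Str.isIn "forex" table_lower then cats.modify "forex" [] (· ++ [p.1])
    else if PySem.Str.isIn "etf" table_lower then cats.modify "etfs" [] (· ++ [p.1])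
    else if PySem.Str.isIn "indic" table_lower then cats.modify "indices" [] (· ++ [p.1])
    else if PySem.Str.isIn "commodit" table_lower then cats.modify "commodities" [] (· ++ [p.1])
    else cats.modify "other" [] (· ++ [p.1])) init
  categories.items

-- ===== PORT B =====
def pvRules : List (String × String) :=
  [("stock", "stocks"), ("crypto", "crypto"), ("forex", "forex"),
   ("etf", "etfs"), ("indic", "indices"), ("commodit", "commodities")]

def pvCats : List String :=
  ["stocks", "crypto", "forex", "etfs", "indices", "commodities", "other"]

def pvCat (name : String) : String :=
  ((pvRules.find? (fun r => PySem.Str.isIn r.1 (PySem.Str.lower name))).map Prod.snd).getD "other"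

def categorize_tables_alt (schemas : List (String × String)) : List (String × List String) :=
  pvCats.map (fun c => (c, (schemas.map Prod.fst).filter (fun n => pvCat n == c)))

-- ===== PRECONDITION & SPEC =====
def Spec_categorize_tables (schemas : List (String × String)) (out : List (String × List String)) : Prop := out = categorize_tables_alt schemas
instance (schemas : List (String × String)) (out : List (String × List String)) : Decidable (Spec_categorize_tables schemas out) := by unfold Spec_categorize_tables; infer_instance

-- ===== CLAIM (what is proved, stated in full; the proofs are below) =====
def Claim_equal_categorize_tables : Prop := ∀ (schemas : List (String × String)), Dom_categorize_tables schemas → Spec_categorize_tables schemas (categorize_tables schemas)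

-- ===== LEMMAS AND PROOFS =====

-- A's if/elif step is exactly "append the name under its pvCat key".
theorem step_eq (cats : PySem.Dict String (List String)) (p : String × String) :
    (let table_lower := PySem.Str.lower p.1
     if PySem.Str.isIn "stock" table_lower then cats.modify "stocks" [] (· ++ [p.1])
     else if PySem.Str.isIn "crypto" table_lower then cats.modify "crypto" [] (· ++ [p.1])
     else if PySem.Str.isIn "forex" table_lower then cats.modify "forex" [] (· ++ [p.1])
     else if PySem.Str.isIn "etf" table_lower then cats.modify "etfs" [] (· ++ [p.1])
     else if PySem.Str.isIn "indic" table_lower then cats.modify "indices" [] (· ++ [p.1])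
     else if PySem.Str.isIn "commodit" table_lower then cats.modify "commodities" [] (· ++ [p.1])
     else cats.modify "other" [] (· ++ [p.1]))
    = cats.modify (pvCat p.1) [] (· ++ [p.1]) := by
  simp only [pvCat, pvRules, List.find?]
  cases h1 : PySem.Str.isIn "stock" (PySem.Str.lower p.1) <;>
  cases h2 : PySem.Str.isIn "crypto" (PySem.Str.lower p.1) <;>
  cases h3 : PySem.Str.isIn "forex" (PySem.Str.lower p.1) <;>
  cases h4 : PySem.Str.isIn "etf" (PySem.Str.lower p.1) <;>
  cases h5 : PySem.Str.isIn "indic" (PySem.Str.lower p.1) <;>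
  cases h6 : PySem.Str.isIn "commodit" (PySem.Str.lower p.1) <;>
  simp [*]

theorem pvCat_mem (name : String) : pvCat name ∈ pvCats := by
  unfold pvCat
  cases h : pvRules.find? (fun r => PySem.Str.isIn r.1 (PySem.Str.lower name)) with
  | none => simp [pvCats]
  | some r =>
      have hr : r ∈ pvRules := List.mem_of_find?_eq_some h
      fin_cases hr <;> simp [pvCats]

-- A dict whose keys are a Nodup list is its keys paired with getD.
theorem items_eq_map_getD (l : List (String × List String))
    (hn : (l.map Prod.fst).Nodup) :
    l = (l.map Prod.fst).map (fun c => (c, (PySem.Dict.mk l).getD c [])) := by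
  induction l with
  | nil => rfl
  | cons kv rest ih =>
      obtain ⟨k, v⟩ := kv
      simp only [List.map_cons, List.nodup_cons] at hn
      simp only [List.map_cons, List.cons.injEq]
      constructor
      · simp [PySem.Dict.getD_eq_get?_getD, PySem.Dict.get?_mk_cons]
      · conv_lhs => rw [ih hn.2]
        apply List.map_congr_left
        intro c hc
        have hck : c ≠ k := fun h => hn.1 (h ▸ hc)
        have hkc : (k == c) = false := beq_eq_false_iff_ne.mpr (Ne.symm hck)
        simp only [PySem.Dict.getD_eq_get?_getD, PySem.Dict.get?_mk_cons, hkc,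
          Bool.false_eq_true, if_false]

-- ===== VERDICT (by name: the statement is the Claim_ definition above) =====
theorem categorize_tables_spec : Claim_equal_categorize_tables := by
  intro schemas _
  show categorize_tables schemas = categorize_tables_alt schemas
  unfold categorize_tables categorize_tables_alt
  -- rewrite A's fold step into keyed-modify form
  have hstep : (fun (cats : PySem.Dict String (List String)) (p : String × String) =>
      let table_lower := PySem.Str.lower p.1
      if PySem.Str.isIn "stock" table_lower then cats.modify "stocks" [] (· ++ [p.1])
      else if PySem.Str.isIn "crypto" table_lower then cats.modify "crypto" [] (· ++ [p.1])
      else if PySem.Str.isIn "forex" table_lower then cats.modify "forex" [] (· ++ [p.1])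
      else if PySem.Str.isIn "etf" table_lower then cats.modify "etfs" [] (· ++ [p.1])
      else if PySem.Str.isIn "indic" table_lower then cats.modify "indices" [] (· ++ [p.1])
      else if PySem.Str.isIn "commodit" table_lower then cats.modify "commodities" [] (· ++ [p.1])
      else cats.modify "other" [] (· ++ [p.1]))
      = (fun cats p => cats.modify (pvCat p.1) [] (· ++ [p.1])) := by
    funext cats p; exact step_eq cats p
  rw [hstep]
  set F := schemas.foldl (fun cats p => cats.modify (pvCat p.1) [] (· ++ [p.1]))
      (PySem.Dict.ofList [("stocks", []), ("crypto", []), ("forex", []), ("etfs", []),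
        ("indices", []), ("commodities", []), ("other", [])]) with hF
  have hnodup : pvCats.Nodup := by decide
  have hkeys : (schemas.foldl (fun cats p => cats.modify (pvCat p.1) [] (· ++ [p.1]))
      (PySem.Dict.ofList [("stocks", []), ("crypto", []), ("forex", []), ("etfs", []),
        ("indices", []), ("commodities", []), ("other", [])])).keys = pvCats := by
    rw [PySem.Dict.keys_foldl_modify_key]
    rw [PySem.Set.update_eq_append_filter]
    have hik : (PySem.Dict.ofList [("stocks", ([] : List String)), ("crypto", []), ("forex", []),
        ("etfs", []), ("indices", []), ("commodities", []), ("other", [])]).keys = pvCats := by rfl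
    rw [hik]
    have : ∀ x ∈ PySem.Set.ofList (schemas.map (fun p => pvCat p.1)),
        PySem.Set.contains pvCats x = true := by
      intro x hx
      have hx' : x ∈ schemas.map (fun p => pvCat p.1) := by
        simpa [PySem.Set.mem_ofList] using hx
      obtain ⟨p, _, rfl⟩ := List.mem_map.mp hx'
      exact (PySem.Set.contains_iff _ _).mpr (pvCat_mem p.1)
    have hfil : (PySem.Set.ofList (schemas.map (fun p => pvCat p.1))).filter
        (fun y => !(PySem.Set.contains pvCats y)) = [] := by
      refine List.filter_eq_nil_iff.mpr ?_
      intro a ha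
      simp only [Bool.not_eq_true', Bool.not_eq_false]
      exact this a ha
    rw [hfil, List.append_nil]
  -- now express items via keys and getD, and compute getD by the grouping lemma
  have hgetD : ∀ c : String,
      (schemas.foldl (fun cats p => cats.modify (pvCat p.1) [] (· ++ [p.1]))
        (PySem.Dict.ofList [("stocks", []), ("crypto", []), ("forex", []), ("etfs", []),
          ("indices", []), ("commodities", []), ("other", [])])).getD c []
      = (schemas.map Prod.fst).filter (fun n => pvCat n == c) := by
    intro c
    rw [show (schemas.foldl (fun cats p => cats.modify (pvCat p.1) [] (· ++ [p.1]))
        (PySem.Dict.ofList [("stocks", []), ("crypto", []), ("forex", []), ("etfs", []),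
          ("indices", []), ("commodities", []), ("other", [])]))
      = ((schemas.map (fun p => (pvCat p.1, p.1))).foldl
          (fun d q => d.modify q.1 [] (· ++ [q.2]))
          (PySem.Dict.ofList [("stocks", []), ("crypto", []), ("forex", []), ("etfs", []),
            ("indices", []), ("commodities", []), ("other", [])]))
      from by rw [List.foldl_map]]
    rw [PySem.Dict.getD_foldl_modify_append]
    have hinit : (PySem.Dict.ofList [("stocks", ([] : List String)), ("crypto", []), ("forex", []),
        ("etfs", []), ("indices", []), ("commodities", []), ("other", [])]).getD c [] = [] := by
      rw [PySem.Dict.getD_eq_get?_getD,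
        show (PySem.Dict.ofList [("stocks", ([] : List String)), ("crypto", []), ("forex", []),
          ("etfs", []), ("indices", []), ("commodities", []), ("other", [])])
        = PySem.Dict.mk [("stocks", []), ("crypto", []), ("forex", []),
          ("etfs", []), ("indices", []), ("commodities", []), ("other", [])] from rfl]
      simp only [PySem.Dict.get?_mk_cons]
      repeat' split
      all_goals rfl
    rw [hinit, List.nil_append]
    simp [List.filter_map, List.map_map, Function.comp_def]
  have hfst : F.items.map Prod.fst = pvCats := hkeys
  have hnd : (F.items.map Prod.fst).Nodup := by rw [hfst]; exact hnodup
  conv_lhs => rw [items_eq_map_getD F.items hnd]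
  rw [hfst]
  refine List.map_congr_left ?_
  intro c _
  have hmk : PySem.Dict.mk F.items = F := rfl
  rw [hmk, hgetD c]
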